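-- pv_equiv track=rewrite | github.com/JensGutow/AoC2022 | d15.py | get_borderSet
-- ===== SOURCE A (Python) =====
-- def get_borderSet(x,y,r):
--     bs = set()
--     px = x
--     py = y-r
--     for dx, dy in[[1,1], [-1,1], [-1,-1], [1,-1]]:
--         for _ in range(r):
--             bs.add((px, py))
--             px += dx
--             py += dy
--     return bs
-- ===== SOURCE B (Python) =====
-- def get_borderSet(x, y, r):
--     # Build one diagonal edge of offsets, then generate the whole ring by
--     # applying the 90-degree rotation (dx, dy) -> (-dy, dx) three times.
--     edge = [(k, k - r) for k in range(r)]
--     offsets = []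
--     for _ in range(4):
--         offsets.extend(edge)
--         edge = [(-dy, dx) for (dx, dy) in edge]
--     return {(x + dx, y + dy) for (dx, dy) in offsets}
-- ===== Notes on version B (the rewrite author's own statement) =====
-- stated objective: alternative
-- what changed: Replaces A's stateful 4-direction edge walk (running px,py accumulator mutated through a nested loop) by a symmetry-based construction: one closed-form edge of offsets is built once and the other three edges are obtained by repeatedly applying the 90-degree rotation (dx,dy)->(-dy,dx), then all offsets are translated to (x,y) and collected into a set.
import Mathlib
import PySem

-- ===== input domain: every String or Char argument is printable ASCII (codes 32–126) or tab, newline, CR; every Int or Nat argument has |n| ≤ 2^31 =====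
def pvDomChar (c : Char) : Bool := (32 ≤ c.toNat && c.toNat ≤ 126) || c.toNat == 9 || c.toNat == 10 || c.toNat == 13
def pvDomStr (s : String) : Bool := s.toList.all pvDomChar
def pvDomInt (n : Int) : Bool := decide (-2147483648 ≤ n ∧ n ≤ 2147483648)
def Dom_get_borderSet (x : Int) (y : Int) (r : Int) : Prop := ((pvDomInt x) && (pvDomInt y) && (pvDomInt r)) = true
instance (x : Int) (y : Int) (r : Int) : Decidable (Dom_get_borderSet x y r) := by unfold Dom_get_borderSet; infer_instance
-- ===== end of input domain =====

-- B builds one edge of offsets and generates the ring by three 90° rotations instead of A's stateful edge walk; objective: alternative.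

-- ===== PORT A =====
-- Literal port of A: running (bs, px, py) state, outer loop over the four directions,
-- inner loop 'for _ in range(r)' adding the current point and stepping by (dx, dy).
def get_borderSet (x : Int) (y : Int) (r : Int) : List (Int × Int) :=
  let st :=
    [((1 : Int), (1 : Int)), (-1, 1), (-1, -1), (1, -1)].foldl
      (fun (st : PySem.Set (Int × Int) × Int × Int) d =>
        (PySem.List.pyRange 0 r 1).foldl
          (fun st _ =>
            (PySem.Set.add st.1 (st.2.1, st.2.2), st.2.1 + d.1, st.2.2 + d.2))
          st)
      (PySem.Set.empty, x, y - r)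
  st.1

-- ===== PORT B =====
-- Port of B: one closed-form edge of offsets; a loop 'for _ in range(4)' appends the
-- current edge to the offset list and rotates it by (dx,dy) -> (-dy,dx); finally the
-- offsets are translated to (x,y) and collected with set(...).
def get_borderSet_alt (x : Int) (y : Int) (r : Int) : List (Int × Int) :=
  let edge0 : List (Int × Int) := (PySem.List.pyRange 0 r 1).map (fun k => (k, k - r))
  let st :=
    (PySem.List.pyRange 0 4 1).foldl
      (fun (st : List (Int × Int) × List (Int × Int)) _ =>
        (st.1 ++ st.2, st.2.map (fun p => (-p.2, p.1))))
      ([], edge0)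
  PySem.Set.ofList (st.1.map (fun p => (x + p.1, y + p.2)))

-- ===== PRECONDITION & SPEC =====
def Spec_get_borderSet (x : Int) (y : Int) (r : Int) (out : List (Int × Int)) : Prop := out = get_borderSet_alt x y r
instance (x : Int) (y : Int) (r : Int) (out : List (Int × Int)) : Decidable (Spec_get_borderSet x y r out) := by unfold Spec_get_borderSet; infer_instance

-- ===== CLAIM (what is proved, stated in full; the proofs are below) =====
def Claim_equal_get_borderSet : Prop := ∀ (x : Int) (y : Int) (r : Int), Dom_get_borderSet x y r → Spec_get_borderSet x y r (get_borderSet x y r)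

-- ===== LEMMAS AND PROOFS =====

-- One edge of A's walk: folding the point-and-step update over any r-element list
-- equals folding Set.add over the closed-form point list, with the end state advanced by r steps.
theorem pvEdge (l : List Int) (s : PySem.Set (Int × Int)) (px py dx dy : Int) :
    l.foldl
      (fun (st : PySem.Set (Int × Int) × Int × Int) (_ : Int) =>
        (PySem.Set.add st.1 (st.2.1, st.2.2), st.2.1 + dx, st.2.2 + dy))
      (s, px, py)
    = (List.foldl PySem.Set.add s
        ((List.range l.length).map (fun k : ℕ => (px + dx * (k : Int), py + dy * (k : Int)))),
       px + dx * l.length, py + dy * l.length) := by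
  induction l generalizing s px py with
  | nil =>
    simp only [List.foldl_nil, List.length_nil, List.range_zero, List.map_nil]
    norm_num
  | cons a l ih =>
    simp only [List.foldl_cons]
    rw [ih, List.length_cons, List.range_succ_eq_map, List.map_cons, List.map_map,
      List.foldl_cons]
    simp only [Prod.mk.injEq]
    refine ⟨?_, by push_cast; ring, by push_cast; ring⟩
    congr 1
    · norm_num
    · refine List.map_congr_left fun k _ => ?_
      simp only [Function.comp, Prod.mk.injEq]
      constructor <;> (push_cast; ring)

theorem get_borderSet_eq (x y r : Int) : get_borderSet x y r = get_borderSet_alt x y r := by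
  have h4 : PySem.List.pyRange 0 4 1 = [0, 1, 2, 3] := by decide
  by_cases hr : r ≤ 0
  · -- empty ring: range(r) is empty on both sides
    simp [get_borderSet, get_borderSet_alt, PySem.List.pyRange_one_eq_nil hr,
      PySem.Set.empty, h4]
  · have h0 : (0 : Int) ≤ r := by omega
    have hrt : ((r.toNat : Int)) = r := Int.toNat_of_nonneg h0
    have hR : PySem.List.pyRange 0 r 1 = (List.range r.toNat).map (fun k : ℕ => (k : Int)) := by
      rw [PySem.List.pyRange_one]
      simp
    unfold get_borderSet get_borderSet_alt
    simp only [h4, List.foldl_cons, List.foldl_nil, List.nil_append]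
    rw [pvEdge, pvEdge, pvEdge, pvEdge]
    simp only [PySem.List.length_pyRange_one, Int.sub_zero, hrt]
    rw [PySem.Set.ofList_eq_foldl]
    simp only [List.map_append, List.map_map, List.foldl_append, hR]
    have mc : ∀ (f g : ℕ → Int × Int) (s t : PySem.Set (Int × Int)), s = t →
        (∀ k : ℕ, f k = g k) →
        List.foldl PySem.Set.add s ((List.range r.toNat).map f)
          = List.foldl PySem.Set.add t ((List.range r.toNat).map g) := by
      intro f g s t hs hfg
      rw [hs, List.map_congr_left (fun k _ => hfg k)]
    refine (mc _ _ _ _ (mc _ _ _ _ (mc _ _ _ _ (mc _ _ _ _ rfl ?_) ?_) ?_) ?_).symm <;>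
      · intro k
        simp only [Function.comp, Prod.mk.injEq]
        constructor <;> ring

-- ===== VERDICT (by name: the statement is the Claim_ definition above) =====
theorem get_borderSet_spec : Claim_equal_get_borderSet := by
  intro x y r _
  exact get_borderSet_eq x y r
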